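-- pv_equiv track=rewrite | github.com/Terryzhang-jp/curise_agent | v2-backend/services/tools/order_query.py | _fuzzy_match_table
-- ===== SOURCE A (Python) =====
-- def _fuzzy_match_table(bad_name: str, real_tables: list[str]) -> str | None:
--     """Find the best matching real table for a non-existent table name.
--
--     Strategy:
--     1. Prefix preservation (v2_ matches v2_ tables first)
--     2. Word overlap scoring
--     3. Substring containment as tiebreaker
--     """
--     bad_has_v2 = bad_name.lower().startswith("v2_")
--     bad_words = set(bad_name.lower().replace("v2_", "").split("_"))
--     bad_words.discard("")
--     # Add plural/singular variants for better matching
--     bad_words_expanded = set(bad_words)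
--     for w in bad_words:
--         if w.endswith("s"):
--             bad_words_expanded.add(w[:-1])  # templates → template
--         else:
--             bad_words_expanded.add(w + "s")  # template → templates
--
--     candidates: list[tuple[int, str]] = []
--
--     for real in real_tables:
--         real_has_v2 = real.lower().startswith("v2_")
--         real_words = set(real.lower().replace("v2_", "").split("_"))
--         real_words.discard("")
--
--         # Word overlap (with singular/plural expansion)
--         overlap = bad_words_expanded & real_words
--         if not overlap:
--             continue
--
--         score = len(overlap) * 40
--
--         # Bonus: same prefix family (v2_ matches v2_)
--         if bad_has_v2 == real_has_v2:
--             score += 20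
--
--         # Bonus: similar total word count (penalize very different lengths)
--         len_diff = abs(len(bad_words) - len(real_words))
--         score -= len_diff * 5
--
--         candidates.append((score, real))
--
--     if not candidates:
--         return None
--
--     candidates.sort(key=lambda x: x[0], reverse=True)
--     return candidates[0][1]
-- ===== SOURCE B (Python) =====
-- def _fuzzy_match_table(bad_name: str, real_tables: list[str]) -> str | None:
--     """Inverted-index re-implementation: build a word -> table-positions postings
--     index once, accumulate each table's overlap count by scanning the postings of
--     the expanded bad words, then select the best table with a running strict
--     maximum (no per-table set intersection, no candidates list, no sort)."""
--
--     def words(name: str) -> set[str]: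
--         ws = set(name.lower().replace("v2_", "").split("_"))
--         ws.discard("")
--         return ws
--
--     bad_v2 = bad_name.lower().startswith("v2_")
--     bad_words = words(bad_name)
--     expanded = bad_words | {w[:-1] if w.endswith("s") else w + "s" for w in bad_words}
--
--     table_words = [words(r) for r in real_tables]
--
--     # inverted index: word -> positions of the tables containing it
--     index: dict[str, list[int]] = {}
--     for i, ws in enumerate(table_words):
--         for w in ws:
--             index.setdefault(w, []).append(i)
--
--     # overlap sizes, accumulated by walking the postings of each expanded word
--     overlap: dict[int, int] = {}
--     for w in expanded:
--         for i in index.get(w, []):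
--             overlap[i] = overlap.get(i, 0) + 1
--
--     best_score = None
--     best = None
--     for i, (real, ws) in enumerate(zip(real_tables, table_words)):
--         n = overlap.get(i, 0)
--         if n == 0:
--             continue
--         score = n * 40
--         if bad_v2 == real.lower().startswith("v2_"):
--             score += 20
--         score -= 5 * abs(len(bad_words) - len(ws))
--         if best_score is None or score > best_score:
--             best_score, best = score, real
--     return best
-- ===== Notes on version B (the rewrite author's own statement) =====
-- stated objective: alternative
-- what changed: Replaced A's per-table set intersection plus candidates-list-and-sort with an inverted index built once (word -> postings of table positions): overlap counts are accumulated by walking the postings of each expanded bad word, so the per-table intersection disappears, and the best table is selected by a running strict maximum instead of a stable descending sort.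
import Mathlib
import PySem

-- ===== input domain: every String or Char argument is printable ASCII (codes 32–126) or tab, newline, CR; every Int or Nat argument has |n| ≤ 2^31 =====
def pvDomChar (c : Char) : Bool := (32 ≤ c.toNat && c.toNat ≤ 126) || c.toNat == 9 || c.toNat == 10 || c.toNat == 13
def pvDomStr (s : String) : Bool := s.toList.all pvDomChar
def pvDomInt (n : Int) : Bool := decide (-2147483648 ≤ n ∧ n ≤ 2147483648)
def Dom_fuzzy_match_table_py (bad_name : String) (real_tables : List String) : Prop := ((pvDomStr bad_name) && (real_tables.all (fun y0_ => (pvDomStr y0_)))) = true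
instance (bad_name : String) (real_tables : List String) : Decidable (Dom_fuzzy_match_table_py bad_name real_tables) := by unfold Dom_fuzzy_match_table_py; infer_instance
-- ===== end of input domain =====

-- B replaces A's per-table set intersection plus candidates-list-and-descending-sort with an
-- inverted index (word -> table positions) whose postings accumulate the overlap counts, and a
-- final running strict maximum; same return value (proved below).

-- ===== PORT A =====
-- shared helper: set(name.lower().replace("v2_", "").split("_")) with "" discarded
-- ("_" is a nonempty literal separator, so split? is always `some`; getD [] is unreachable)
def pvWords (s : String) : PySem.Set String :=
  PySem.Set.discard
    (PySem.Set.ofList ((PySem.Str.split? (PySem.Str.replace (PySem.Str.lower s) "v2_" "") "_").getD [])) ""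

-- the loop body of A's `for real in real_tables` loop, verbatim
def pvStepA (bad_has_v2 : Bool) (bad_words expanded : PySem.Set String)
    (acc : List (Int × String)) (real : String) : List (Int × String) :=
  let real_has_v2 := PySem.Str.startswith (PySem.Str.lower real) "v2_"
  let real_words := pvWords real
  let overlap := PySem.Set.inter expanded real_words
  if overlap = [] then acc
  else
    let score := PySem.Set.len overlap * 40
    let score := if bad_has_v2 = real_has_v2 then score + 20 else score
    let score := score - |PySem.Set.len bad_words - PySem.Set.len real_words| * 5
    acc ++ [(score, real)]

def fuzzy_match_table_py (bad_name : String) (real_tables : List String) : Option String :=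
  let bad_has_v2 := PySem.Str.startswith (PySem.Str.lower bad_name) "v2_"
  let bad_words := pvWords bad_name
  let expanded := List.foldl
    (fun s w => if PySem.Str.endswith w "s"
                then PySem.Set.add s (PySem.Str.slice w none (some (-1)))
                else PySem.Set.add s (w ++ "s"))
    (PySem.Set.ofList bad_words) bad_words
  let candidates := List.foldl (pvStepA bad_has_v2 bad_words expanded) [] real_tables
  if candidates = [] then none
  else
    match PySem.List.sorted candidates (fun x => x.1) true with
    | [] => none   -- unreachable: candidates ≠ []
    | c :: _ => some c.2

-- ===== PORT B =====
-- the set-comprehension element: w[:-1] if w.endswith("s") else w + "s"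
def pvVariant (w : String) : String :=
  if PySem.Str.endswith w "s" then PySem.Str.slice w none (some (-1)) else w ++ "s"

-- B's inverted index: for i, ws in enumerate(table_words): for w in ws: index[w] = index.get(w, []) + [i]
def pvIndex (tableWords : List (PySem.Set String)) : PySem.Dict String (List Int) :=
  (PySem.List.enumerate tableWords 0).foldl
    (fun d p => p.2.foldl (fun d w => PySem.Dict.modify d w [] (fun l => l ++ [p.1])) d)
    PySem.Dict.empty

-- B's selection-loop body: running strict maximum over (position, (table, its words))
def pvStepB (bad_v2 : Bool) (bad_words : PySem.Set String) (overlap : PySem.Dict Int Int)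
    (st : Option Int × Option String) (p : Int × (String × PySem.Set String)) :
    Option Int × Option String :=
  let n := PySem.Dict.getD overlap p.1 0
  if n = 0 then st
  else
    let score := n * 40
    let score := if bad_v2 = PySem.Str.startswith (PySem.Str.lower p.2.1) "v2_" then score + 20 else score
    let score := score - 5 * |PySem.Set.len bad_words - PySem.Set.len p.2.2|
    match st.1 with
    | none => (some score, some p.2.1)
    | some bs => if score > bs then (some score, some p.2.1) else st

def fuzzy_match_table_py_alt (bad_name : String) (real_tables : List String) : Option String :=
  let bad_v2 := PySem.Str.startswith (PySem.Str.lower bad_name) "v2_"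
  let bad_words := pvWords bad_name
  let expanded := PySem.Set.union bad_words (PySem.Set.ofList (bad_words.map pvVariant))
  let tableWords := real_tables.map pvWords
  let index := pvIndex tableWords
  -- for w in expanded: for i in index.get(w, []): overlap[i] = overlap.get(i, 0) + 1
  let overlap := expanded.foldl
    (fun d w => (PySem.Dict.getD index w []).foldl
      (fun d i => PySem.Dict.insert d i (PySem.Dict.getD d i 0 + 1)) d)
    (PySem.Dict.empty : PySem.Dict Int Int)
  ((PySem.List.enumerate (List.zip real_tables tableWords) 0).foldl
    (pvStepB bad_v2 bad_words overlap) (none, none)).2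

-- ===== PRECONDITION & SPEC =====
def Spec_fuzzy_match_table_py (bad_name : String) (real_tables : List String) (out : Option String) : Prop := out = fuzzy_match_table_py_alt bad_name real_tables
instance (bad_name : String) (real_tables : List String) (out : Option String) : Decidable (Spec_fuzzy_match_table_py bad_name real_tables out) := by unfold Spec_fuzzy_match_table_py; infer_instance

-- ===== CLAIM (what is proved, stated in full; the proofs are below) =====
def Claim_equal_fuzzy_match_table_py : Prop := ∀ (bad_name : String) (real_tables : List String), Dom_fuzzy_match_table_py bad_name real_tables → Spec_fuzzy_match_table_py bad_name real_tables (fuzzy_match_table_py bad_name real_tables)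

-- ===== LEMMAS AND PROOFS =====

-- the overlap count both programs are about: |{w in E : w in rw}| (E listing distinct elements)
def pvCnt (E rw : PySem.Set String) : Nat := E.countP (fun w => decide (w ∈ rw))

-- the per-table score, written in B's arithmetic shape (none = no overlap: the table is skipped)
def pvScoreC (bad_v2 : Bool) (bw E : PySem.Set String) (real : String) : Option Int :=
  let rw := pvWords real
  let n : Int := (pvCnt E rw : Int)
  if n = 0 then none
  else some ((if bad_v2 = PySem.Str.startswith (PySem.Str.lower real) "v2_" then n * 40 + 20 else n * 40)
             - 5 * |PySem.Set.len bw - PySem.Set.len rw|)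

theorem pv_nodup_words (s : String) : (pvWords s).Nodup :=
  (PySem.Set.nodup_ofList _).filter _

theorem pv_nodup_foldl_add (l : List String) (s0 : PySem.Set String) (h : s0.Nodup) :
    (l.foldl (fun s w => if PySem.Str.endswith w "s"
                 then PySem.Set.add s (PySem.Str.slice w none (some (-1)))
                 else PySem.Set.add s (w ++ "s")) s0).Nodup := by
  induction l generalizing s0 with
  | nil => exact h
  | cons hd t ih =>
    simp only [List.foldl_cons]
    apply ih
    split <;> exact PySem.Set.nodup_add _ _ h

theorem pv_mem_foldl_add (l : List String) (s0 : PySem.Set String) (x : String) :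
    x ∈ l.foldl (fun s w => if PySem.Str.endswith w "s"
                 then PySem.Set.add s (PySem.Str.slice w none (some (-1)))
                 else PySem.Set.add s (w ++ "s")) s0
      ↔ x ∈ s0 ∨ ∃ u ∈ l, pvVariant u = x := by
  induction l generalizing s0 with
  | nil => simp
  | cons hd t ih =>
    simp only [List.foldl_cons, List.mem_cons]
    have hv : (if PySem.Str.endswith hd "s" = true
               then PySem.Set.add s0 (PySem.Str.slice hd none (some (-1)))
               else PySem.Set.add s0 (hd ++ "s")) = PySem.Set.add s0 (pvVariant hd) := by
      unfold pvVariant; split <;> rfl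
    rw [hv, ih]
    simp only [PySem.Set.mem_add]
    constructor
    · rintro (( hx | hx ) | ⟨u, hu, hx⟩)
      · exact Or.inl hx
      · exact Or.inr ⟨hd, Or.inl rfl, hx.symm⟩
      · exact Or.inr ⟨u, Or.inr hu, hx⟩
    · rintro (hx | ⟨u, (rfl | hu), hx⟩)
      · exact Or.inl (Or.inl hx)
      · exact Or.inl (Or.inr hx.symm)
      · exact Or.inr ⟨u, hu, hx⟩

-- A's loop body produces exactly the pvScoreC candidate (expanded may be any distinct
-- listing of the same set of words as E)
theorem pv_stepA_eq (b : Bool) (bw exp E : PySem.Set String) (hexp : exp.Nodup) (hE : E.Nodup)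
    (hmem : ∀ x, x ∈ exp ↔ x ∈ E) (acc : List (Int × String)) (real : String) :
    pvStepA b bw exp acc real =
      match pvScoreC b bw E real with
      | none => acc
      | some s => acc ++ [(s, real)] := by
  have hlen : (PySem.Set.inter exp (pvWords real)).length = pvCnt E (pvWords real) := by
    unfold PySem.Set.inter pvCnt
    rw [← List.countP_eq_length_filter]
    have h1 : exp.countP (fun x => (pvWords real).contains x)
        = exp.countP (fun w => decide (w ∈ pvWords real)) :=
      List.countP_congr (by intro x _; simp)
    rw [h1]
    exact ((List.perm_ext_iff_of_nodup hexp hE).mpr hmem).countP_eq _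
  by_cases h0 : pvCnt E (pvWords real) = 0
  · have hz : PySem.Set.inter exp (pvWords real) = [] :=
      List.length_eq_zero_iff.mp (by rw [hlen, h0])
    have hsc : pvScoreC b bw E real = none := by
      unfold pvScoreC; simp [h0]
    rw [hsc]
    unfold pvStepA
    rw [if_pos hz]
  · have hz : PySem.Set.inter exp (pvWords real) ≠ [] := by
      intro h; exact h0 (by rw [← hlen, h, List.length_nil])
    have hsc : pvScoreC b bw E real
        = some ((if b = PySem.Str.startswith (PySem.Str.lower real) "v2_"
                 then (pvCnt E (pvWords real) : Int) * 40 + 20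
                 else (pvCnt E (pvWords real) : Int) * 40)
                - 5 * |PySem.Set.len bw - PySem.Set.len (pvWords real)|) := by
      unfold pvScoreC
      rw [if_neg (by exact_mod_cast h0)]
    rw [hsc]
    unfold pvStepA
    rw [if_neg hz]
    simp only [PySem.Set.len, hlen]
    refine congrArg (fun z : Int => acc ++ [(z, real)]) ?_
    split_ifs <;> ring

-- the 'sort descending then take the first' selection equals a running strict maximum
def pvPairStep (st : Option Int × Option String) (c : Int × String) : Option Int × Option String :=
  match st.1 with
  | none => (some c.1, some c.2)
  | some bs => if c.1 > bs then (some c.1, some c.2) else st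

def pvRel (acc : List (Int × String)) (st : Option Int × Option String) : Prop :=
  st.1 = acc.head?.map Prod.fst ∧ st.2 = acc.head?.map Prod.snd

theorem pv_rel_foldl (cs : List (Int × String)) :
    ∀ (acc : List (Int × String)) (st : Option Int × Option String), pvRel acc st →
      pvRel (cs.foldl (fun a x =>
          PySem.List.insertBy (fun a b =>
            decide ((fun x : Int × String => x.1) b < (fun x : Int × String => x.1) a)) x a) acc)
        (cs.foldl pvPairStep st) := by
  induction cs with
  | nil => intro acc st h; exact h
  | cons c t ih =>
    intro acc st h
    simp only [List.foldl_cons]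
    apply ih
    obtain ⟨s1, s2⟩ := st
    obtain ⟨h1, h2⟩ := h
    simp only at h1 h2
    subst h1; subst h2
    cases acc with
    | nil =>
      simp only [List.head?_nil, Option.map_none]
      exact ⟨rfl, rfl⟩
    | cons y ys =>
      simp only [List.head?_cons, Option.map_some]
      unfold PySem.List.insertBy pvPairStep
      simp only []
      by_cases hlt : y.1 < c.1
      · rw [if_pos (by simpa using hlt : decide (y.1 < c.1) = true),
            if_pos (by simpa using hlt : c.1 > y.1)]
        exact ⟨rfl, rfl⟩
      · rw [if_neg (by simpa using hlt : ¬ decide (y.1 < c.1) = true),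
            if_neg (by simpa using hlt : ¬ c.1 > y.1)]
        exact ⟨rfl, rfl⟩

theorem pv_select_eq (cs : List (Int × String)) :
    (if cs = [] then (none : Option String)
     else match PySem.List.sorted cs (fun x => x.1) true with
          | [] => none
          | c :: _ => some c.2)
      = (cs.foldl pvPairStep ((none : Option Int), (none : Option String))).2 := by
  have h := pv_rel_foldl cs [] (none, none) ⟨rfl, rfl⟩
  rw [← PySem.List.sorted_rev_eq_foldl_insertBy] at h
  obtain ⟨h1, h2⟩ := h
  by_cases hc : cs = []
  · subst hc; rfl
  · rw [if_neg hc]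
    cases hs : PySem.List.sorted cs (fun x => x.1) true with
    | nil => rw [hs] at h2; simpa using h2.symm
    | cons c cs' => rw [hs] at h2; simpa using h2.symm

theorem pv_foldl_matchappend (f : String → Option Int) (rts : List String)
    (acc : List (Int × String)) :
    rts.foldl (fun a r => match f r with | none => a | some s => a ++ [(s, r)]) acc
      = acc ++ rts.filterMap (fun r => (f r).map (fun s => (s, r))) := by
  induction rts generalizing acc with
  | nil => simp
  | cons hd t ih =>
    simp only [List.foldl_cons, List.filterMap_cons]
    cases hf : f hd <;> simp only [Option.map_none, Option.map_some] <;> simp [ih]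

theorem pv_foldl_scoresel (f : String → Option Int) (rts : List String)
    (st : Option Int × Option String) :
    rts.foldl (fun st r => match f r with | none => st | some sc => pvPairStep st (sc, r)) st
      = (rts.filterMap (fun r => (f r).map (fun s => (s, r)))).foldl pvPairStep st := by
  induction rts generalizing st with
  | nil => rfl
  | cons hd t ih =>
    simp only [List.foldl_cons, List.filterMap_cons]
    cases hf : f hd
    · simp only [Option.map_none]
      exact ih _
    · simp only [Option.map_some, List.foldl_cons]
      exact ih _

-- one table's contribution to a word's postings list
theorem pv_filter_map_pair (ws : List String) (hnd : ws.Nodup) (i : Int) (w : String) :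
    ((ws.map (fun w' => (w', i))).filter (fun q => q.1 == w)).map (fun q => q.2)
      = if w ∈ ws then [i] else [] := by
  induction ws with
  | nil => simp
  | cons v t ih =>
    obtain ⟨hv, ht⟩ := List.nodup_cons.mp hnd
    simp only [List.map_cons, List.filter_cons]
    by_cases hvw : v = w
    · subst hvw
      have hrest : (t.map (fun w' => (w', i))).filter (fun q => q.1 == v) = [] := by
        apply List.filter_eq_nil_iff.mpr
        intro q hq
        obtain ⟨w', hw', rfl⟩ := List.mem_map.mp hq
        simp only [beq_iff_eq]
        intro h
        exact hv (h ▸ hw')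
      simp [hrest]
    · have hne : (((v, i).1 == w)) = false := by simpa using hvw
      have hwv : ¬ w = v := fun h => hvw h.symm
      simp [hne, ih ht, hwv]

-- the postings list the inverted index stores for a word
theorem pv_index_getD (TW : List (PySem.Set String)) (hnd : ∀ ws ∈ TW, ws.Nodup) (w : String) :
    PySem.Dict.getD (pvIndex TW) w []
      = (PySem.List.enumerate TW 0).flatMap (fun p => if w ∈ p.2 then [p.1] else []) := by
  unfold pvIndex
  have h1 : (PySem.List.enumerate TW 0).foldl
      (fun d p => p.2.foldl (fun d w' => PySem.Dict.modify d w' [] (fun l => l ++ [p.1])) d)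
      (PySem.Dict.empty : PySem.Dict String (List Int))
    = ((PySem.List.enumerate TW 0).flatMap (fun p => p.2.map (fun w' => (w', p.1)))).foldl
      (fun d q => PySem.Dict.modify d q.1 [] (fun l => l ++ [q.2])) PySem.Dict.empty := by
    rw [List.foldl_flatMap]
    apply List.foldl_ext
    intro d p _
    conv_rhs => rw [List.foldl_map]
  rw [h1, PySem.Dict.getD_foldl_modify_append, PySem.Dict.getD_empty, List.nil_append,
    List.filter_flatMap, List.map_flatMap]
  apply List.flatMap_congr
  intro p hp
  have hp2 : p.2 ∈ TW := by
    have hm : p.2 ∈ (PySem.List.enumerate TW 0).map (fun x => x.2) := List.mem_map.mpr ⟨p, hp, rfl⟩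
    rwa [PySem.List.map_snd_enumerate] at hm
  exact pv_filter_map_pair p.2 (hnd _ hp2) p.1 w

-- every position in a suffix's postings exceeds the start index
theorem pv_postings_lb (t : List (PySem.Set String)) (s : Int) (w : String) (x : Int)
    (hx : x ∈ (PySem.List.enumerate t s).flatMap (fun p => if w ∈ p.2 then [p.1] else [])) :
    s ≤ x := by
  obtain ⟨p, hp, hxin⟩ := List.mem_flatMap.mp hx
  have hx1 : x = p.1 := by
    by_cases hw : w ∈ p.2
    · rw [if_pos hw] at hxin; simpa using hxin
    · rw [if_neg hw] at hxin; simp at hxin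
  have hp1 : p.1 ∈ (PySem.List.enumerate t s).map (fun x => x.1) := List.mem_map.mpr ⟨p, hp, rfl⟩
  rw [PySem.List.map_fst_enumerate] at hp1
  have := (PySem.List.mem_pyRange_one.mp hp1).1
  omega

-- how often position s+k occurs in a word's postings: once if the k-th table has the word
theorem pv_count_postings (TW : List (PySem.Set String)) (w : String) (s : Int) (k : Nat)
    (hk : k < TW.length) :
    ((PySem.List.enumerate TW s).flatMap (fun p => if w ∈ p.2 then [p.1] else [])).count
        (s + (k : Int))
      = if w ∈ TW[k] then 1 else 0 := by
  induction TW generalizing s k with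
  | nil => simp at hk
  | cons ws t ih =>
    rw [PySem.List.enumerate_cons, List.flatMap_cons, List.count_append]
    cases k with
    | zero =>
      have htl : ((PySem.List.enumerate t (s + 1)).flatMap
          (fun p => if w ∈ p.2 then [p.1] else [])).count (s + ((0 : Nat) : Int)) = 0 := by
        apply List.count_eq_zero.mpr
        intro hmem
        have := pv_postings_lb t (s + 1) w _ hmem
        omega
      rw [htl]
      simp only [List.getElem_cons_zero, Nat.cast_zero, add_zero]
      by_cases hw : w ∈ ws
      · rw [if_pos hw, if_pos hw]
        simp
      · rw [if_neg hw, if_neg hw]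
        simp
    | succ k' =>
      have hhd : (if w ∈ ws then [s] else []).count (s + ((k' + 1 : Nat) : Int)) = 0 := by
        by_cases hw : w ∈ ws
        · rw [if_pos hw]
          apply List.count_eq_zero.mpr
          simp only [List.mem_singleton]
          push_cast
          omega
        · rw [if_neg hw]
          simp
      rw [hhd, Nat.zero_add]
      have harg : s + ((k' + 1 : Nat) : Int) = (s + 1) + (k' : Int) := by push_cast; ring
      rw [harg, ih (s + 1) k' (by simpa using hk)]
      simp

-- a 0/1 Nat sum over the expanded words is the overlap count
theorem pv_sum_ite (E : List String) (tw : PySem.Set String) :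
    (E.map (fun w => if w ∈ tw then 1 else 0)).sum = E.countP (fun w => decide (w ∈ tw)) := by
  induction E with
  | nil => simp
  | cons hd t ih =>
    simp only [List.map_cons, List.sum_cons, List.countP_cons, ih]
    by_cases h : hd ∈ tw
    · simp [h]
      omega
    · simp [h]

-- the accumulated overlap dictionary holds each table's overlap count
theorem pv_overlap_getD (E : PySem.Set String) (TW : List (PySem.Set String))
    (hnd : ∀ ws ∈ TW, ws.Nodup) (k : Nat) (hk : k < TW.length) :
    PySem.Dict.getD
      (E.foldl (fun d w => (PySem.Dict.getD (pvIndex TW) w []).foldl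
         (fun d i => PySem.Dict.insert d i (PySem.Dict.getD d i 0 + 1)) d)
       (PySem.Dict.empty : PySem.Dict Int Int)) (k : Int) 0
      = (pvCnt E TW[k] : Int) := by
  have hflat := List.foldl_flatMap (f := fun w => PySem.Dict.getD (pvIndex TW) w [])
      (g := fun d i => PySem.Dict.insert d i (PySem.Dict.getD d i 0 + 1))
      (l := E) (init := (PySem.Dict.empty : PySem.Dict Int Int))
  rw [← hflat, PySem.Dict.getD_foldl_insert_add_one, PySem.Dict.getD_empty, zero_add]
  have hcnt : List.count ((k : Nat) : Int) (E.flatMap (fun w => PySem.Dict.getD (pvIndex TW) w []))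
      = pvCnt E TW[k] := by
    rw [List.count_flatMap]
    have hmap : E.map (List.count ((k : Nat) : Int) ∘ fun w => PySem.Dict.getD (pvIndex TW) w [])
        = E.map (fun w => if w ∈ TW[k] then 1 else 0) := by
      apply List.map_congr_left
      intro w _
      show List.count ((k : Nat) : Int) (PySem.Dict.getD (pvIndex TW) w []) = _
      rw [pv_index_getD TW hnd w]
      have := pv_count_postings TW w 0 k hk
      simpa using this
    rw [hmap, pv_sum_ite]
    rfl
  rw [hcnt]

-- B's selection loop, given the overlap counts, is the running maximum over pvScoreC
set_option maxHeartbeats 1000000 in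
theorem pv_final_fold (b : Bool) (bw E : PySem.Set String) (ov : PySem.Dict Int Int)
    (rts : List String) (s : Int) (st : Option Int × Option String)
    (h : ∀ (k : Nat), k < rts.length →
        ∀ (hk : k < rts.length), PySem.Dict.getD ov (s + (k : Int)) 0 = (pvCnt E (pvWords rts[k]) : Int)) :
    (PySem.List.enumerate (List.zip rts (rts.map pvWords)) s).foldl (pvStepB b bw ov) st
      = rts.foldl (fun st r => match pvScoreC b bw E r with
          | none => st
          | some sc => pvPairStep st (sc, r)) st := by
  induction rts generalizing s st with
  | nil => rfl
  | cons r t ih =>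
    simp only [List.map_cons, List.zip_cons_cons, PySem.List.enumerate_cons, List.foldl_cons]
    have hn : PySem.Dict.getD ov s 0 = (pvCnt E (pvWords r) : Int) := by
      have := h 0 (by simp) (by simp)
      simpa using this
    have hhd : pvStepB b bw ov st (s, (r, pvWords r))
        = match pvScoreC b bw E r with
          | none => st
          | some sc => pvPairStep st (sc, r) := by
      by_cases h0 : (pvCnt E (pvWords r) : Int) = 0
      · have hsc : pvScoreC b bw E r = none := by
          simp only [pvScoreC]
          rw [if_pos h0]
        rw [hsc]
        simp only [pvStepB]
        rw [hn, if_pos h0]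
      · have hsc : pvScoreC b bw E r
            = some ((if b = PySem.Str.startswith (PySem.Str.lower r) "v2_"
                     then (pvCnt E (pvWords r) : Int) * 40 + 20
                     else (pvCnt E (pvWords r) : Int) * 40)
                    - 5 * |PySem.Set.len bw - PySem.Set.len (pvWords r)|) := by
          simp only [pvScoreC]
          rw [if_neg h0]
        rw [hsc]
        simp only [pvStepB]
        rw [hn, if_neg h0]
        obtain ⟨s1, s2⟩ := st
        cases s1 <;> rfl
    rw [hhd]
    apply ih (s + 1)
    intro k hk hk'
    have := h (k + 1) (by simpa using Nat.succ_lt_succ hk) (by simpa using Nat.succ_lt_succ hk)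
    have harg : s + ((k + 1 : Nat) : Int) = (s + 1) + (k : Int) := by push_cast; ring
    rw [harg] at this
    simpa [List.getElem_cons_succ] using this

set_option maxHeartbeats 2000000 in
theorem pv_main_eq (bad_name : String) (real_tables : List String) :
    fuzzy_match_table_py bad_name real_tables = fuzzy_match_table_py_alt bad_name real_tables := by
  unfold fuzzy_match_table_py fuzzy_match_table_py_alt
  simp only []
  set b := PySem.Str.startswith (PySem.Str.lower bad_name) "v2_" with hb
  set bw := pvWords bad_name with hbw
  set expA := List.foldl
    (fun s w => if PySem.Str.endswith w "s"
                then PySem.Set.add s (PySem.Str.slice w none (some (-1)))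
                else PySem.Set.add s (w ++ "s"))
    (PySem.Set.ofList bw) bw with hexpdef
  set E := PySem.Set.union bw (PySem.Set.ofList (bw.map pvVariant)) with hEdef
  have hbwnd : bw.Nodup := pv_nodup_words bad_name
  have hexpnd : expA.Nodup := pv_nodup_foldl_add _ _ (PySem.Set.nodup_ofList _)
  have hEnd : E.Nodup := PySem.Set.nodup_union bw _ hbwnd
  have hmem : ∀ x, x ∈ expA ↔ x ∈ E := by
    intro x
    rw [hexpdef, hEdef]
    rw [pv_mem_foldl_add, PySem.Set.mem_union, PySem.Set.mem_ofList, PySem.Set.mem_ofList]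
    simp [List.mem_map]
  -- A side: candidates as a filterMap of scores
  have hfoldA : List.foldl (pvStepA b bw expA) [] real_tables
      = real_tables.filterMap (fun r => (pvScoreC b bw E r).map (fun s => (s, r))) := by
    have h1 : List.foldl (pvStepA b bw expA) [] real_tables
        = List.foldl (fun a r => match pvScoreC b bw E r with
            | none => a | some s => a ++ [(s, r)]) [] real_tables := by
      apply List.foldl_ext
      intro a r _
      exact pv_stepA_eq b bw expA E hexpnd hEnd hmem a r
    rw [h1, pv_foldl_matchappend]
    simp
  -- B side: the selection loop as the running maximum over the same scores
  have hnd : ∀ ws ∈ real_tables.map pvWords, ws.Nodup := by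
    intro ws hws
    obtain ⟨r, _, rfl⟩ := List.mem_map.mp hws
    exact pv_nodup_words r
  have hcounts : ∀ (k : Nat), k < real_tables.length → ∀ (_ : k < real_tables.length),
      PySem.Dict.getD
        (E.foldl (fun d w => (PySem.Dict.getD (pvIndex (real_tables.map pvWords)) w []).foldl
          (fun d i => PySem.Dict.insert d i (PySem.Dict.getD d i 0 + 1)) d)
          (PySem.Dict.empty : PySem.Dict Int Int)) ((0 : Int) + (k : Int)) 0
        = (pvCnt E (pvWords real_tables[k]) : Int) := by
    intro k hk _
    have hk' : k < (real_tables.map pvWords).length := by simpa using hk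
    have h2 := pv_overlap_getD E (real_tables.map pvWords) hnd k hk'
    rw [List.getElem_map] at h2
    rw [zero_add]
    exact h2
  have hfoldB := pv_final_fold b bw E
      (E.foldl (fun d w => (PySem.Dict.getD (pvIndex (real_tables.map pvWords)) w []).foldl
        (fun d i => PySem.Dict.insert d i (PySem.Dict.getD d i 0 + 1)) d)
        (PySem.Dict.empty : PySem.Dict Int Int))
      real_tables 0 ((none : Option Int), (none : Option String)) hcounts
  rw [hfoldA, hfoldB, pv_foldl_scoresel, pv_select_eq]

-- ===== VERDICT (by name: the statement is the Claim_ definition above) =====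
theorem fuzzy_match_table_py_spec : Claim_equal_fuzzy_match_table_py := by
  intro bad_name real_tables _
  unfold Spec_fuzzy_match_table_py
  exact pv_main_eq bad_name real_tables
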